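-- pv_equiv track=rewrite | github.com/coD1010/01testing | ejericicios de progra/multipli 2 numbers.py | multiply_without_operator
-- ===== SOURCE A (Python) =====
-- def multiply_without_operator(x, y):
--     result = 0
--     # If one of the numbers is negative, make both numbers positive
--     neg_result = (x < 0) ^ (y < 0)
--     x = abs(x)
--     y = abs(y)
--
--     # Perform repeated addition
--     for _ in range(y):
--         result += x
--
--     # Negate the result if necessary
--     if neg_result:
--         result = -result
--
--     return result
-- ===== SOURCE B (Python) =====
-- def multiply_without_operator(x, y):
--     a, b = abs(x), abs(y)
--     res = 0
--     while b:
--         if b & 1: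
--             res += a
--         a += a
--         b >>= 1
--     return -res if (x < 0) ^ (y < 0) else res
-- ===== Notes on version B (the rewrite author's own statement) =====
-- stated objective: faster
-- what changed: Replaces O(|y|) repeated addition with Russian-peasant (binary double-and-add) multiplication over the bits of |y|, same xor sign logic.
import Mathlib
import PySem

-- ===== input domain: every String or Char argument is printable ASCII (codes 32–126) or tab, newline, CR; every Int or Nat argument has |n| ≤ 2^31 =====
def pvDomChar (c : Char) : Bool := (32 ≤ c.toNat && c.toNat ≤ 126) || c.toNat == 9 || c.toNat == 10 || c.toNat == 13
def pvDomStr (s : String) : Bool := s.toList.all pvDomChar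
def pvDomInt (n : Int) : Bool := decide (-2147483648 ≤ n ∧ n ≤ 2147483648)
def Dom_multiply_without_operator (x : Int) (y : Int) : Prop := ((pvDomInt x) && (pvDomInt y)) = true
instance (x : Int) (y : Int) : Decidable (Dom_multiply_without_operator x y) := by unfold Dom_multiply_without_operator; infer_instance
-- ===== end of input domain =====

-- B replaces A's O(|y|) repeated-addition loop with Russian-peasant (double-and-add) multiplication: faster (asymptotic).

-- ===== PORT A =====
-- for _ in range(y): result += x   (after x := |x|, y := |y|, sign recorded first)
def multiply_without_operator (x : Int) (y : Int) : Int :=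
  let negResult := (decide (x < 0)) != (decide (y < 0))
  let x' := |x|
  let y' := |y|
  let result := (PySem.List.pyRange 0 y' 1).foldl (fun r _ => r + x') 0
  if negResult then -result else result

-- ===== PORT B =====
-- while b: if b & 1: res += a; a += a; b >>= 1   — structural recursion on the Nat b
def pvPeasant (a : Int) (b : Nat) (res : Int) : Int :=
  if b = 0 then res
  else pvPeasant (a + a) (b / 2) (if b % 2 = 1 then res + a else res)

def multiply_without_operator_alt (x : Int) (y : Int) : Int :=
  let a := |x|
  let b := |y|.toNat
  let res := pvPeasant a b 0
  if (decide (x < 0)) != (decide (y < 0)) then -res else res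

-- ===== PRECONDITION & SPEC =====
def Spec_multiply_without_operator (x : Int) (y : Int) (out : Int) : Prop := out = multiply_without_operator_alt x y
instance (x : Int) (y : Int) (out : Int) : Decidable (Spec_multiply_without_operator x y out) := by unfold Spec_multiply_without_operator; infer_instance

-- ===== CLAIM (what is proved, stated in full; the proofs are below) =====
def Claim_equal_multiply_without_operator : Prop := ∀ (x : Int) (y : Int), Dom_multiply_without_operator x y → Spec_multiply_without_operator x y (multiply_without_operator x y)

-- ===== LEMMAS AND PROOFS =====

-- A's loop computes r + x' * (number of iterations)
theorem pv_foldl_add_const (x' r : Int) (l : List Int) :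
    l.foldl (fun r _ => r + x') r = r + x' * l.length := by
  induction l generalizing r with
  | nil => simp
  | cons h t ih => simp [List.foldl, ih]; ring

theorem pv_peasant_eq (b : Nat) : ∀ (a res : Int), pvPeasant a b res = res + a * b := by
  induction b using Nat.strong_induction_on with
  | _ b ih =>
    intro a res
    unfold pvPeasant
    by_cases hb : b = 0
    · simp [hb]
    · rw [if_neg hb, ih (b / 2) (Nat.div_lt_self (Nat.pos_of_ne_zero hb) one_lt_two)]
      have hsplit : ((b : Int)) = 2 * ↑(b / 2) + ↑(b % 2) := by
        push_cast
        omega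
      rcases Nat.mod_two_eq_zero_or_one b with h | h <;>
        simp only [h] <;>
        rw [hsplit, h] <;> push_cast <;> ring

theorem pv_range_len (n : Int) (hn : 0 ≤ n) : (PySem.List.pyRange 0 n 1).length = n.toNat := by
  simp [PySem.List.pyRange]
  omega

theorem multiply_spec_aux (x y : Int) :
    multiply_without_operator x y = multiply_without_operator_alt x y := by
  unfold multiply_without_operator multiply_without_operator_alt
  simp only [pv_foldl_add_const, pv_peasant_eq, pv_range_len _ (abs_nonneg y)]

-- ===== VERDICT (by name: the statement is the Claim_ definition above) =====
theorem multiply_without_operator_spec : Claim_equal_multiply_without_operator := by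
  intro x y _
  exact multiply_spec_aux x y
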